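-- pv_equiv track=rewrite | github.com/puzzleclone/PuzzleClone | customs/trams.py | waiting_minutes
-- ===== SOURCE A (Python) =====
-- import heapq
--
-- def waiting_minutes(repairs,num_workers):
--     # 维修时间列表（按升序排列）
--     # repairs = [8, 12, 14, 17, 18, 23, 30]
--     repairs = sorted(repairs)
--
--     # 初始化三名工人的总维修时间（使用最小堆）
--     workers = [(0, i) for i in range(num_workers)]  # (总时间, 工人编号)
--     heapq.heapify(workers)
--
--     # 记录每个工人的任务列表
--     worker_tasks = [[] for _ in range(num_workers)]
--
--     # 分配任务
--     for time in repairs: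
--         current_time, worker_id = heapq.heappop(workers)
--         worker_tasks[worker_id].append(time)
--         new_time = current_time + time
--         heapq.heappush(workers, (new_time, worker_id))
--
--     # 计算总停开时间
--     total_waiting = 0
--     minutes = []
--     for tasks in worker_tasks:
--         n = len(tasks)
--         minutes.append(sum(tasks))
--         for i, time in enumerate(tasks):
--             total_waiting += time * (n - i)  # 后续任务数 + 1
--
--     # 计算最小损失
--     # loss = total_waiting * 11
--     return total_waiting, minutes, worker_tasks
-- ===== SOURCE B (Python) =====
-- def waiting_minutes(repairs, num_workers):
--     # one pass: total waiting = sum of completion times; minutes = final loads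
--     loads = [0] * num_workers
--     worker_tasks = [[] for _ in range(num_workers)]
--     total_waiting = 0
--     for time in sorted(repairs):
--         i = min(range(num_workers), key=lambda j: (loads[j], j))
--         worker_tasks[i].append(time)
--         loads[i] += time
--         total_waiting += loads[i]
--     return total_waiting, loads, worker_tasks
-- ===== Notes on version B (the rewrite author's own statement) =====
-- stated objective: simpler
-- what changed: B drops the heap and the whole second aggregation pass: it keeps a plain per-worker load array, picks the worker by a first-minimum scan (min over range with key (load, id)), and accumulates the weighted waiting time online as the sum of completion times, returning the load array itself as 'minutes'.
import Mathlib
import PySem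

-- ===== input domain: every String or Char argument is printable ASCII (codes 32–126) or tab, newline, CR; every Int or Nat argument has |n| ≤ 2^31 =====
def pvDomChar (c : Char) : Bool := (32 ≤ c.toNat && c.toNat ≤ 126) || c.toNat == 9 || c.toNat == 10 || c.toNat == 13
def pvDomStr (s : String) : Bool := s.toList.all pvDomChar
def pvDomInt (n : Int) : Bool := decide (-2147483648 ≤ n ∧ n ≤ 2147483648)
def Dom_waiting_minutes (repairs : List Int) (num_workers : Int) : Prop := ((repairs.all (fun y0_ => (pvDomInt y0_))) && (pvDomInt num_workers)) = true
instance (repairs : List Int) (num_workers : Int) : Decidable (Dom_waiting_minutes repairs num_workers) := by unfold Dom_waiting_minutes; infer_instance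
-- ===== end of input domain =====

-- B drops the heap and A's second aggregation pass: a plain load array, a first-minimum scan,
-- and the waiting total accumulated online as a sum of completion times (objective: simpler).

-- ===== PORT A =====
-- heapq on a list of (load, id) tuples, compared lexicographically.  The heap layout is
-- internal to the stdlib, so the heapq calls are ported at the level of their contract:
-- heappop extracts the least tuple (unique here: ids are distinct), heappush inserts one.
def heapMin? : List (Int × Int) → Option (Int × Int)
  | [] => none   -- heappop of an empty heap raises IndexError (excluded by Pre_)
  | x :: xs => some (xs.foldl (fun m y =>
      if y.1 < m.1 || (y.1 == m.1 && y.2 < m.2) then y else m) x)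

def waiting_minutes (repairs : List Int) (num_workers : Int) : Int × List Int × List (List Int) :=
  let reps := PySem.List.sorted repairs (fun x => x) false
  let workers : List (Int × Int) := (PySem.List.pyRange 0 num_workers 1).map (fun i => ((0 : Int), i))
  -- heapq.heapify(workers): establishes the heap invariant; no effect on the heap's contents
  let tasks0 : List (List Int) := (PySem.List.pyRange 0 num_workers 1).map (fun _ => ([] : List Int))
  let st := reps.foldl (fun (st : List (Int × Int) × List (List Int)) time =>
    match heapMin? st.1 with
    | none => st
    | some m =>
      -- heappop: remove the least tuple; worker_tasks[worker_id].append(time); heappush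
      (st.1.erase m ++ [(m.1 + time, m.2)],
       st.2.modify m.2.toNat (fun l => l ++ [time]))) (workers, tasks0)
  let fin := st.2.foldl (fun (acc : Int × List Int) tasks =>
    let n : Int := tasks.length
    ((PySem.List.enumerate tasks 0).foldl (fun s p => s + p.2 * (n - p.1)) acc.1,
     acc.2 ++ [tasks.sum])) ((0 : Int), ([] : List Int))
  (fin.1, fin.2, st.2)

-- ===== PORT B =====
def waiting_minutes_alt (repairs : List Int) (num_workers : Int) : Int × List Int × List (List Int) :=
  let loads0 : List Int := List.replicate num_workers.toNat 0
  let tasks0 : List (List Int) := (PySem.List.pyRange 0 num_workers 1).map (fun _ => ([] : List Int))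
  let st := (PySem.List.sorted repairs (fun x => x) false).foldl
    (fun (st : List Int × List (List Int) × Int) time =>
      -- i = min(range(num_workers), key=lambda j: (loads[j], j))
      match PySem.List.min2? (PySem.List.pyRange 0 num_workers 1)
              (fun j => PySem.List.pyGetD st.1 j 0) (fun j => j) with
      | none => st   -- min() over an empty range raises ValueError (excluded by Pre_)
      | some i =>
        let nl := PySem.List.pyGetD st.1 i 0 + time
        (st.1.set i.toNat nl, st.2.1.modify i.toNat (fun l => l ++ [time]), st.2.2 + nl))
    (loads0, tasks0, 0)
  (st.2.2, st.1, st.2.1)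

-- ===== PRECONDITION & SPEC =====
-- Pre_ excludes exactly the inputs on which A raises: a nonempty repair list with
-- num_workers ≤ 0 makes heappop fail with IndexError (B's min() raises ValueError there too).
def Pre_waiting_minutes (repairs : List Int) (num_workers : Int) : Prop :=
  repairs = [] ∨ 1 ≤ num_workers
instance (repairs : List Int) (num_workers : Int) : Decidable (Pre_waiting_minutes repairs num_workers) := by unfold Pre_waiting_minutes; infer_instance

def pvWitness_waiting_minutes : List Int × Int := ([8, 12, 14, 17, 18, 23, 30], 3)

def Spec_waiting_minutes (repairs : List Int) (num_workers : Int) (out : Int × List Int × List (List Int)) : Prop := out = waiting_minutes_alt repairs num_workers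
instance (repairs : List Int) (num_workers : Int) (out : Int × List Int × List (List Int)) : Decidable (Spec_waiting_minutes repairs num_workers out) := by unfold Spec_waiting_minutes; infer_instance

-- ===== CLAIM (what is proved, stated in full; the proofs are below) =====
def Claim_equal_waiting_minutes : Prop := ∀ (repairs : List Int) (num_workers : Int), Dom_waiting_minutes repairs num_workers → Pre_waiting_minutes repairs num_workers → Spec_waiting_minutes repairs num_workers (waiting_minutes repairs num_workers)

-- ===== LEMMAS AND PROOFS =====
-- lexicographic comparison of (load, worker-id) pairs, as Python compares tuples
def pvLexLe (a b : Int × Int) : Prop := a.1 < b.1 ∨ (a.1 = b.1 ∧ a.2 ≤ b.2)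

-- A's weighted waiting time of one worker's task list
def pvW (l : List Int) : Int :=
  ((PySem.List.enumerate l 0).map (fun p => p.2 * ((l.length : Int) - p.1))).sum

-- the (load, id) pairs a load array represents
def pvPairs (loads : List Int) : List (Int × Int) :=
  (PySem.List.enumerate loads 0).map (fun p => (p.2, p.1))

-- the two loop bodies, named (definitionally equal to the lambdas in the ports)
def pvStepA : (List (Int × Int) × List (List Int)) → Int → (List (Int × Int) × List (List Int)) :=
  fun st time => match heapMin? st.1 with
    | none => st
    | some m =>
      (st.1.erase m ++ [(m.1 + time, m.2)],
       st.2.modify m.2.toNat (fun l => l ++ [time]))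

def pvStepB (nw : Int) : (List Int × List (List Int) × Int) → Int → (List Int × List (List Int) × Int) :=
  fun st time =>
    match PySem.List.min2? (PySem.List.pyRange 0 nw 1)
            (fun j => PySem.List.pyGetD st.1 j 0) (fun j => j) with
    | none => st
    | some i =>
      (st.1.set i.toNat (PySem.List.pyGetD st.1 i 0 + time),
       st.2.1.modify i.toNat (fun l => l ++ [time]),
       st.2.2 + (PySem.List.pyGetD st.1 i 0 + time))

-- the loop invariant
def pvInv (nw : Int) (sa : List (Int × Int) × List (List Int))
    (sb : List Int × List (List Int) × Int) : Prop :=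
  sa.1.Perm (pvPairs sb.1) ∧ sa.2 = sb.2.1 ∧ sb.1.length = nw.toNat ∧
  sb.2.1.length = nw.toNat ∧ (∀ k : Nat, sb.1.getD k 0 = (sb.2.1.getD k []).sum) ∧
  sb.2.2 = (sb.2.1.map pvW).sum

theorem pvLexLe_antisymm {a b : Int × Int} (h1 : pvLexLe a b) (h2 : pvLexLe b a) : a = b := by
  obtain ⟨a1, a2⟩ := a; obtain ⟨b1, b2⟩ := b
  simp only [pvLexLe, Prod.mk.injEq] at *
  omega

theorem pvFoldlMin {α : Type} (b : α → α → Bool) (le : α → α → Prop)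
    (htrans : ∀ x y z, le x y → le y z → le x z)
    (hrefl : ∀ x, le x x)
    (hb : ∀ y m, (b y m = true → le y m) ∧ (b y m = false → le m y)) :
    ∀ (xs : List α) (x : α), (xs.foldl (fun m y => if b y m then y else m) x) ∈ x :: xs ∧
      ∀ z ∈ x :: xs, le (xs.foldl (fun m y => if b y m then y else m) x) z := by
  intro xs
  induction xs with
  | nil => intro x; simpa using hrefl x
  | cons y ys ih =>
    intro x
    have key : List.foldl (fun m y => if b y m then y else m) x (y :: ys)
        = List.foldl (fun m y => if b y m then y else m) (if b y x then y else x) ys := rfl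
    by_cases hc : b y x = true
    · have hity : (if b y x then y else x) = y := if_pos hc
      rw [key, hity]
      obtain ⟨hmem, hle⟩ := ih y
      have hself : le (List.foldl (fun m y => if b y m then y else m) y ys) y :=
        hle _ List.mem_cons_self
      refine ⟨List.mem_cons_of_mem _ hmem, ?_⟩
      intro z hz
      rcases List.mem_cons.mp hz with h | h
      · rw [h]; exact htrans _ _ _ hself ((hb y x).1 hc)
      · exact hle _ h
    · have hcf : b y x = false := eq_false_of_ne_true hc
      have hity : (if b y x then y else x) = x := if_neg (by simp [hcf])
      rw [key, hity]
      obtain ⟨hmem, hle⟩ := ih x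
      have hself : le (List.foldl (fun m y => if b y m then y else m) x ys) x :=
        hle _ List.mem_cons_self
      refine ⟨?_, ?_⟩
      · rcases List.mem_cons.mp hmem with h | h
        · rw [h]; exact List.mem_cons_self
        · exact List.mem_cons_of_mem _ (List.mem_cons_of_mem _ h)
      · intro z hz
        rcases List.mem_cons.mp hz with h | h
        · rw [h]; exact hself
        · rcases List.mem_cons.mp h with h2 | h2
          · rw [h2]; exact htrans _ _ _ hself ((hb y x).2 hcf)
          · exact hle _ (List.mem_cons_of_mem _ h2)

theorem pvHeapMin_some {l : List (Int × Int)} (h : l ≠ []) : ∃ m, heapMin? l = some m := by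
  cases l with
  | nil => exact absurd rfl h
  | cons x xs => exact ⟨_, rfl⟩

theorem pvHeapMin_spec {l : List (Int × Int)} {m : Int × Int} (h : heapMin? l = some m) :
    m ∈ l ∧ ∀ y ∈ l, pvLexLe m y := by
  cases l with
  | nil => simp [heapMin?] at h
  | cons x xs =>
    simp only [heapMin?, Option.some.injEq] at h
    subst h
    refine pvFoldlMin (fun y m => y.1 < m.1 || (y.1 == m.1 && y.2 < m.2)) pvLexLe ?_ ?_ ?_ xs x
    · intro a c d h1 h2
      simp only [pvLexLe] at *
      omega
    · intro a; simp [pvLexLe]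
    · intro a c
      constructor <;> intro hc <;>
        simp only [Bool.or_eq_true, Bool.and_eq_true, decide_eq_true_eq, beq_iff_eq,
          Bool.or_eq_false_iff, Bool.and_eq_false_iff, decide_eq_false_iff_not, beq_eq_false_iff_ne] at hc <;>
        simp only [pvLexLe] <;> omega

def pvStepO (k1 k2 : Int → Int) : Option Int → Int → Option Int :=
  fun acc x => match acc with
    | none => some x
    | some m =>
      if (decide (k1 x < k1 m) || (!decide (k1 m < k1 x) && decide (k2 x < k2 m))) = true
      then some x else some m

theorem pvMin2_eq (k1 k2 : Int → Int) (xs : List Int) :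
    PySem.List.min2? xs k1 k2 = List.foldl (pvStepO k1 k2) none xs := by
  unfold PySem.List.min2?
  congr 1
  funext acc x
  cases acc <;> rfl

theorem pvMin2_foldl (k1 k2 : Int → Int) (xs : List Int) :
    ∀ (x : Int), List.foldl (pvStepO k1 k2) (some x) xs
      = some (xs.foldl (fun m y =>
          if (decide (k1 y < k1 m) || (!decide (k1 m < k1 y) && decide (k2 y < k2 m))) then y else m) x) := by
  induction xs with
  | nil => intro x; rfl
  | cons y ys ih =>
    intro x
    rw [List.foldl_cons, List.foldl_cons]
    have hred : pvStepO k1 k2 (some x) y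
        = if (decide (k1 y < k1 x) || (!decide (k1 x < k1 y) && decide (k2 y < k2 x))) = true
          then some y else some x := rfl
    rw [hred]
    by_cases hc : (decide (k1 y < k1 x) || (!decide (k1 x < k1 y) && decide (k2 y < k2 x))) = true
    · rw [if_pos hc, if_pos hc]
      exact ih y
    · rw [if_neg (by simp_all), if_neg (by simp_all)]
      exact ih x

theorem pvMin2_some (k1 k2 : Int → Int) {xs : List Int} (h : xs ≠ []) :
    ∃ m, PySem.List.min2? xs k1 k2 = some m := by
  cases xs with
  | nil => exact absurd rfl h
  | cons x xs =>
    rw [pvMin2_eq, List.foldl_cons]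
    have hred : pvStepO k1 k2 none x = some x := rfl
    rw [hred, pvMin2_foldl]
    exact ⟨_, rfl⟩

theorem pvMin2_spec (k1 k2 : Int → Int) {xs : List Int} {m : Int}
    (h : PySem.List.min2? xs k1 k2 = some m) :
    m ∈ xs ∧ ∀ y ∈ xs, pvLexLe (k1 m, k2 m) (k1 y, k2 y) := by
  cases xs with
  | nil => rw [pvMin2_eq] at h; simp at h
  | cons x xs =>
    rw [pvMin2_eq, List.foldl_cons] at h
    have hred : pvStepO k1 k2 none x = some x := rfl
    rw [hred, pvMin2_foldl] at h
    simp only [Option.some.injEq] at h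
    subst h
    refine pvFoldlMin
      (fun y m => decide (k1 y < k1 m) || (!decide (k1 m < k1 y) && decide (k2 y < k2 m)))
      (fun a b => pvLexLe (k1 a, k2 a) (k1 b, k2 b)) ?_ ?_ ?_ xs x
    · intro a c d h1 h2
      simp only [pvLexLe] at *
      omega
    · intro a; simp [pvLexLe]
    · intro a c
      constructor <;> intro hc <;>
        simp only [Bool.or_eq_true, Bool.and_eq_true, Bool.not_eq_true', decide_eq_true_eq,
          Bool.or_eq_false_iff, Bool.and_eq_false_iff, Bool.not_eq_false',
          decide_eq_false_iff_not] at hc <;>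
        simp only [pvLexLe] <;> omega

theorem pvMinUnique {l1 l2 : List (Int × Int)} (hp : l1.Perm l2) {m1 m2 : Int × Int}
    (h1m : m1 ∈ l1) (h1 : ∀ y ∈ l1, pvLexLe m1 y)
    (h2m : m2 ∈ l2) (h2 : ∀ y ∈ l2, pvLexLe m2 y) : m1 = m2 :=
  pvLexLe_antisymm (h1 m2 (hp.symm.subset h2m)) (h2 m1 (hp.subset h1m))

theorem pvPairs_length (l : List Int) : (pvPairs l).length = l.length := by
  simp [pvPairs, PySem.List.length_enumerate]

theorem pvPairs_getElem (l : List Int) (k : Nat) (hk : k < l.length) :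
    (pvPairs l)[k]'(by rw [pvPairs_length]; exact hk) = (l[k], (k : Int)) := by
  simp [pvPairs, List.getElem_map, PySem.List.getElem_enumerate]

theorem pvPairs_mem {l : List Int} {p : Int × Int} :
    p ∈ pvPairs l ↔ ∃ k : Nat, ∃ _ : k < l.length, p = (l[k], (k : Int)) := by
  rw [List.mem_iff_getElem]
  constructor
  · rintro ⟨k, hk, rfl⟩
    have hk' : k < l.length := by rwa [pvPairs_length] at hk
    exact ⟨k, hk', pvPairs_getElem l k hk'⟩
  · rintro ⟨k, hk, rfl⟩
    exact ⟨k, by rwa [pvPairs_length], pvPairs_getElem l k hk⟩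

theorem pvPairs_set {l : List Int} {i : Nat} (_hi : i < l.length) (v : Int) :
    pvPairs (l.set i v) = (pvPairs l).set i (v, (i : Int)) := by
  apply List.ext_getElem
  · simp [pvPairs_length]
  · intro k h1 h2
    have hk : k < l.length := by
      rwa [pvPairs_length, List.length_set] at h1
    have hL := pvPairs_getElem (l.set i v) k (by rwa [List.length_set])
    rw [List.getElem_set] at hL
    rw [hL, List.getElem_set]
    by_cases hik : i = k
    · subst hik; simp
    · simp [hik, pvPairs_getElem l k hk]

theorem pvPermStep {X : List (Int × Int)} {k : Nat} (hk : k < X.length) (y : Int × Int) :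
    (X.erase X[k] ++ [y]).Perm (X.set k y) := by
  have hX : X.take k ++ X[k] :: X.drop (k + 1) = X := by
    rw [List.getElem_cons_drop, List.take_append_drop]
  have hset : X.set k y = X.take k ++ y :: X.drop (k + 1) := by
    rw [List.set_eq_take_append_cons_drop]
    simp [hk]
  have hmid : X.Perm (X[k] :: (X.take k ++ X.drop (k + 1))) := by
    conv_lhs => rw [← hX]
    exact List.perm_middle
  have hcons : X.Perm (X[k] :: X.erase X[k]) :=
    List.perm_cons_erase (List.getElem_mem hk)
  have herase : (X.erase X[k]).Perm (X.take k ++ X.drop (k + 1)) :=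
    (hcons.symm.trans hmid).cons_inv
  refine (List.perm_append_singleton y _).trans ?_
  refine (herase.cons y).trans ?_
  rw [hset]
  exact List.perm_middle.symm

theorem pvW_nil : pvW [] = 0 := rfl

theorem pvW_append (l : List Int) (t : Int) : pvW (l ++ [t]) = pvW l + (l.sum + t) := by
  have hstep : PySem.List.enumerate (l ++ [t]) 0
      = PySem.List.enumerate l 0 ++ [((l.length : Int), t)] := by
    rw [PySem.List.enumerate_append]
    simp [PySem.List.enumerate]
  rw [pvW, hstep, List.map_append, List.sum_append]
  have hlen : (((l ++ [t]).length : Nat) : Int) = (l.length : Int) + 1 := by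
    simp
  have hmain : (List.map (fun p => p.2 * (((l ++ [t]).length : Int) - p.1))
      (PySem.List.enumerate l 0)).sum = pvW l + l.sum := by
    have hcongr : List.map (fun p => p.2 * (((l ++ [t]).length : Int) - p.1))
        (PySem.List.enumerate l 0)
        = List.map (fun p => p.2 * ((l.length : Int) - p.1) + p.2) (PySem.List.enumerate l 0) := by
      apply List.map_congr_left
      intro p _
      rw [hlen]
      ring
    rw [hcongr, PySem.List.sum_map_add_int, pvW, PySem.List.map_snd_enumerate]
  rw [hmain]
  have htail : (List.map (fun p => p.2 * (((l ++ [t]).length : Int) - p.1))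
      [((l.length : Int), t)]).sum = t := by
    simp
  rw [htail]
  ring

theorem pvSum_map_modify (f : List Int → List Int) :
    ∀ (l : List (List Int)) (i : Nat) (hi : i < l.length),
      ((l.modify i f).map pvW).sum = (l.map pvW).sum + (pvW (f (l[i]'hi)) - pvW (l[i]'hi)) := by
  intro l
  induction l with
  | nil => intro i hi; simp at hi
  | cons x xs ih =>
    intro i hi
    cases i with
    | zero =>
      simp [List.modify]
      ring
    | succ n =>
      have hn : n < xs.length := by simpa using hi
      simp only [List.modify_succ_cons, List.map_cons, List.sum_cons, ih n hn,
        List.getElem_cons_succ]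
      ring

-- loads equals per-worker sums
theorem pvLoads_eq {loads : List Int} {tasks : List (List Int)}
    (hlen : loads.length = tasks.length)
    (hsum : ∀ k : Nat, loads.getD k 0 = (tasks.getD k []).sum) :
    loads = tasks.map List.sum := by
  apply List.ext_getElem
  · simpa using hlen
  · intro k h1 h2
    have hk2 : k < tasks.length := by simpa using h2
    have := hsum k
    rwa [List.getD_eq_getElem?_getD, List.getD_eq_getElem?_getD,
      List.getElem?_eq_getElem h1, List.getElem?_eq_getElem hk2,
      Option.getD_some, Option.getD_some, ← List.getElem_map (f := List.sum) (h := h2)] at this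

theorem pvMapW_tasks0 (nw : Int) :
    ((((PySem.List.pyRange 0 nw 1).map (fun _ => ([] : List Int)))).map pvW).sum = 0 := by
  rw [List.map_map]
  have : (pvW ∘ fun _ => ([] : List Int)) = fun (_ : Int) => (0 : Int) := by
    funext x; simp [pvW_nil]
  rw [this, List.map_const', List.sum_replicate]
  simp

theorem pvMapSum_tasks0 (nw : Int) :
    (((PySem.List.pyRange 0 nw 1).map (fun _ => ([] : List Int)))).map List.sum
      = List.replicate nw.toNat 0 := by
  rw [List.map_map]
  have : (List.sum ∘ fun _ => ([] : List Int)) = fun (_ : Int) => (0 : Int) := by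
    funext x; simp
  rw [this, List.map_const']
  simp [PySem.List.length_pyRange_one]

-- the initial states satisfy the invariant
theorem pvInit (nw : Int) :
    pvInv nw ((PySem.List.pyRange 0 nw 1).map (fun i => ((0 : Int), i)),
              (PySem.List.pyRange 0 nw 1).map (fun _ => ([] : List Int)))
             (List.replicate nw.toNat 0,
              (PySem.List.pyRange 0 nw 1).map (fun _ => ([] : List Int)), 0) := by
  refine ⟨?_, rfl, by simp, by simp [PySem.List.length_pyRange_one], ?_, ?_⟩
  · have : (PySem.List.pyRange 0 nw 1).map (fun i => ((0 : Int), i))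
        = pvPairs (List.replicate nw.toNat 0) := by
      apply List.ext_getElem
      · simp [pvPairs_length, PySem.List.length_pyRange_one]
      · intro k h1 h2
        have hk : k < nw.toNat := by
          simpa [PySem.List.length_pyRange_one] using h1
        rw [List.getElem_map, PySem.List.getElem_pyRange_one]
        rw [pvPairs_getElem _ k (by simpa using hk)]
        simp
    rw [this]
  · intro k
    by_cases hk : k < nw.toNat
    · rw [List.getD_eq_getElem?_getD, List.getD_eq_getElem?_getD,
        List.getElem?_eq_getElem (by simpa using hk),
        List.getElem?_eq_getElem (by simpa [PySem.List.length_pyRange_one] using hk)]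
      simp
    · rw [List.getD_eq_getElem?_getD, List.getD_eq_getElem?_getD,
        List.getElem?_eq_none (by simpa using Nat.le_of_not_lt hk),
        List.getElem?_eq_none (by simpa [PySem.List.length_pyRange_one] using Nat.le_of_not_lt hk)]
      simp
  · rw [pvMapW_tasks0]

-- one loop step preserves the invariant
theorem pvStep_preserve {nw : Int} (h1 : 1 ≤ nw) {sa : List (Int × Int) × List (List Int)}
    {sb : List Int × List (List Int) × Int} (hI : pvInv nw sa sb) (t : Int) :
    pvInv nw (pvStepA sa t) (pvStepB nw sb t) := by
  obtain ⟨wk, tasksA⟩ := sa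
  obtain ⟨loads, tasksB, tw⟩ := sb
  obtain ⟨hperm, htasks, hlen, hlent, hsum, htw⟩ := hI
  dsimp only at hperm htasks hlen hlent hsum htw
  have hrange_ne : PySem.List.pyRange 0 nw 1 ≠ [] := by
    intro h
    have := congrArg List.length h
    rw [PySem.List.length_pyRange_one] at this
    simp at this
    omega
  obtain ⟨i, hi⟩ := pvMin2_some (fun j => PySem.List.pyGetD loads j 0) (fun j => j) hrange_ne
  obtain ⟨him, himin⟩ := pvMin2_spec _ _ hi
  have hi0 : 0 ≤ i ∧ i < nw := PySem.List.mem_pyRange_one.mp him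
  have hkl : i.toNat < loads.length := by rw [hlen]; omega
  have hik : (i.toNat : Int) = i := by omega
  have hkey : PySem.List.pyGetD loads i 0 = loads[i.toNat] :=
    PySem.List.pyGetD_eq_getElem loads 0 hi0.1 (by rw [hlen]; omega)
  -- (loads[i], i) is the lex-least pair of pvPairs loads
  have hminpair : ∀ p ∈ pvPairs loads, pvLexLe (loads[i.toNat], (i.toNat : Int)) p := by
    intro p hp
    obtain ⟨j, hj, rfl⟩ := pvPairs_mem.mp hp
    have hjm : (j : Int) ∈ PySem.List.pyRange 0 nw 1 := by
      rw [PySem.List.mem_pyRange_one]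
      constructor
      · positivity
      · rw [hlen] at hj; omega
    have h2 := himin _ hjm
    have hkeyj : PySem.List.pyGetD loads (j : Int) 0 = loads[j] :=
      PySem.List.pyGetD_eq_getElem loads 0 (by positivity) (by simpa using hj)
    simpa [hkey, hkeyj, hik] using h2
  -- A pops the same pair
  have hwk_ne : wk ≠ [] := by
    intro h
    subst h
    have := hperm.length_eq
    rw [pvPairs_length, hlen] at this
    simp at this
    omega
  obtain ⟨m, hm⟩ := pvHeapMin_some hwk_ne
  obtain ⟨hmm, hmmin⟩ := pvHeapMin_spec hm
  have hmem_pairs : (loads[i.toNat], (i.toNat : Int)) ∈ pvPairs loads :=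
    pvPairs_mem.mpr ⟨i.toNat, hkl, rfl⟩
  have hmeq : m = (loads[i.toNat], (i.toNat : Int)) :=
    pvMinUnique hperm hmm hmmin hmem_pairs hminpair
  -- compute both steps
  simp only [pvStepA, pvStepB, hm, hi, hmeq, hkey, Int.toNat_natCast]
  have hXk : (pvPairs loads)[i.toNat]'(by rw [pvPairs_length]; exact hkl)
      = (loads[i.toNat], (i.toNat : Int)) := pvPairs_getElem loads i.toNat hkl
  refine ⟨?_, ?_, ?_, ?_, ?_, ?_⟩
  · -- permutation
    dsimp only
    rw [pvPairs_set hkl]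
    refine ((hperm.erase _).append_right _).trans ?_
    rw [← hXk]
    exact pvPermStep (by rw [pvPairs_length]; exact hkl) _
  · dsimp only
    rw [htasks]
  · simp [hlen]
  · simp [hlent]
  · intro k
    dsimp only
    have hkt : i.toNat < tasksB.length := by rw [hlent, ← hlen]; exact hkl
    by_cases hk : k = i.toNat
    · subst hk
      rw [List.getD_eq_getElem?_getD, List.getD_eq_getElem?_getD,
        List.getElem?_set_self (by exact hkl), List.getElem?_modify,
        List.getElem?_eq_getElem hkt]
      have := hsum i.toNat
      rw [List.getD_eq_getElem?_getD, List.getD_eq_getElem?_getD,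
        List.getElem?_eq_getElem hkl, List.getElem?_eq_getElem hkt] at this
      simp only [Option.getD_some] at this
      simp [this, List.sum_append]
    · rw [List.getD_eq_getElem?_getD, List.getD_eq_getElem?_getD,
        List.getElem?_set_ne (by omega), List.getElem?_modify]
      have := hsum k
      rw [List.getD_eq_getElem?_getD, List.getD_eq_getElem?_getD] at this
      cases hok : tasksB[k]? with
      | none => simp [hok] at this ⊢; rw [this]
      | some v =>
        simp only [hok, if_neg (by omega : ¬ i.toNat = k)] at *
        simpa [hok] using this
  · dsimp only
    have hkt : i.toNat < tasksB.length := by rw [hlent, ← hlen]; exact hkl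
    rw [pvSum_map_modify _ tasksB i.toNat hkt, pvW_append]
    have := hsum i.toNat
    rw [List.getD_eq_getElem?_getD, List.getD_eq_getElem?_getD,
      List.getElem?_eq_getElem hkl, List.getElem?_eq_getElem hkt] at this
    simp only [Option.getD_some] at this
    rw [htw, this]
    ring

theorem pvFold_preserve {nw : Int} (h1 : 1 ≤ nw) :
    ∀ (ts : List Int) (sa : List (Int × Int) × List (List Int))
      (sb : List Int × List (List Int) × Int), pvInv nw sa sb →
      pvInv nw (ts.foldl pvStepA sa) (ts.foldl (pvStepB nw) sb) := by
  intro ts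
  induction ts with
  | nil => intro sa sb h; exact h
  | cons t ts ih =>
    intro sa sb h
    rw [List.foldl_cons, List.foldl_cons]
    exact ih _ _ (pvStep_preserve h1 h t)

-- A's final aggregation pass, in closed form
theorem pvFinal (tasks : List (List Int)) :
    ∀ (a : Int) (b : List Int),
      tasks.foldl (fun (acc : Int × List Int) x =>
        ((PySem.List.enumerate x 0).foldl (fun s p => s + p.2 * ((x.length : Int) - p.1)) acc.1,
         acc.2 ++ [x.sum])) (a, b)
      = (a + (tasks.map pvW).sum, b ++ tasks.map List.sum) := by
  induction tasks with
  | nil => intro a b; simp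
  | cons x xs ih =>
    intro a b
    rw [List.foldl_cons]
    have hstep : (PySem.List.enumerate x 0).foldl
        (fun s p => s + p.2 * ((x.length : Int) - p.1)) a = a + pvW x := by
      rw [PySem.List.foldl_add]
      rfl
    rw [hstep, ih]
    simp [add_assoc]

-- the ports, restated through the named step functions (definitional)
theorem pvA_eq (repairs : List Int) (nw : Int) :
    waiting_minutes repairs nw =
      (let st := (PySem.List.sorted repairs (fun x => x) false).foldl pvStepA
         ((PySem.List.pyRange 0 nw 1).map (fun i => ((0 : Int), i)),
          (PySem.List.pyRange 0 nw 1).map (fun _ => ([] : List Int)))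
       let fin := st.2.foldl (fun (acc : Int × List Int) x =>
         ((PySem.List.enumerate x 0).foldl (fun s p => s + p.2 * ((x.length : Int) - p.1)) acc.1,
          acc.2 ++ [x.sum])) (0, [])
       (fin.1, fin.2, st.2)) := rfl

theorem pvB_eq (repairs : List Int) (nw : Int) :
    waiting_minutes_alt repairs nw =
      (let st := (PySem.List.sorted repairs (fun x => x) false).foldl (pvStepB nw)
         (List.replicate nw.toNat 0,
          (PySem.List.pyRange 0 nw 1).map (fun _ => ([] : List Int)), 0)
       (st.2.2, st.1, st.2.1)) := rfl

theorem pvMain (repairs : List Int) (nw : Int)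
    (hpre : repairs = [] ∨ 1 ≤ nw) :
    waiting_minutes repairs nw = waiting_minutes_alt repairs nw := by
  rcases hpre with hrep | hnw
  · subst hrep
    have hs : PySem.List.sorted ([] : List Int) (fun x => x) false = [] := by
      rw [PySem.List.sorted_eq_nil_iff]
    rw [pvA_eq, pvB_eq]
    simp only [hs, List.foldl_nil]
    rw [pvFinal, pvMapW_tasks0, pvMapSum_tasks0]
    simp
  · rw [pvA_eq, pvB_eq]
    simp only
    have hInv := pvFold_preserve hnw (PySem.List.sorted repairs (fun x => x) false) _ _ (pvInit nw)
    set fa := (PySem.List.sorted repairs (fun x => x) false).foldl pvStepA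
      ((PySem.List.pyRange 0 nw 1).map (fun i => ((0 : Int), i)),
       (PySem.List.pyRange 0 nw 1).map (fun _ => ([] : List Int))) with hfa
    set fb := (PySem.List.sorted repairs (fun x => x) false).foldl (pvStepB nw)
      (List.replicate nw.toNat 0,
       (PySem.List.pyRange 0 nw 1).map (fun _ => ([] : List Int)), 0) with hfb
    obtain ⟨hperm, htasks, hlen, hlent, hsum, htw⟩ := hInv
    rw [pvFinal]
    refine Prod.ext ?_ (Prod.ext ?_ ?_)
    · simp only [zero_add]
      rw [htw, htasks]
    · simp only [List.nil_append]
      rw [pvLoads_eq (by rw [hlen, hlent]) hsum, htasks]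
    · exact htasks

-- ===== VERDICT (by name: the statement is the Claim_ definition above) =====
theorem waiting_minutes_spec : Claim_equal_waiting_minutes := by
  intro repairs num_workers _ hpre
  unfold Spec_waiting_minutes
  exact pvMain repairs num_workers hpre
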